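-- pv_equiv track=rewrite | github.com/thehalleyyoung/halley-labs | causal-robustness-radii/implementation/causalcert/solver/restart_strategy.py | luby_sequence
-- ===== SOURCE A (Python) =====
-- def luby_sequence(index: int) -> int:
--     """Return the *index*-th term of the Luby sequence (0-based).
--
--     The Luby sequence is: 1 1 2 1 1 2 4 1 1 2 1 1 2 4 8 ...
--
--     Parameters
--     ----------
--     index : int
--         0-based index into the sequence.
--
--     Returns
--     -------
--     int
--         Luby value at the given index.
--     """
--     # Standard iterative Luby computation.
--     i = index + 1  # 1-based
--     # Find k, seq such that i fits in the pattern
--     k = 1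
--     p = 1
--     while p < i:
--         k += 1
--         p = 2 * p + 1
--     # Now p = 2^k - 1 >= i
--     while p != i:
--         p = (p - 1) >> 1
--         if i > p:
--             i -= p
--     return (p + 1) >> 1
-- ===== SOURCE B (Python) =====
-- def luby_sequence(index: int) -> int:
--     """Luby value at 0-based index, via the classic recursive characterisation:
--     working on the 1-based position i, if i+1 is a power of two (i = 2^k - 1)
--     the value is 2^(k-1); otherwise drop the completed prefix of 2^(bl-1)-1
--     positions (bl = bit length of i) and recurse."""
--     def go(i: int) -> int:
--         if (i + 1) & i == 0:          # i = 2^k - 1 (also hit for i in {0, -1})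
--             return (i + 1) >> 1
--         return go(i - (1 << (i.bit_length() - 1)) + 1)
--     return go(index + 1)
-- ===== Notes on version B (the rewrite author's own statement) =====
-- stated objective: alternative
-- what changed: Replaces A's two while-loops (growing p to the enclosing 2^k-1 block, then repeatedly halving p while shifting i) with the classic recursive Luby recurrence: a power-of-two test (i+1)&i==0 answers directly, otherwise bit_length jumps straight to the completed prefix to subtract and recurses.
-- outside the precondition, e.g. on luby_sequence(-3): A does not finish within the time limit, B raises RecursionError
import Mathlib
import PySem

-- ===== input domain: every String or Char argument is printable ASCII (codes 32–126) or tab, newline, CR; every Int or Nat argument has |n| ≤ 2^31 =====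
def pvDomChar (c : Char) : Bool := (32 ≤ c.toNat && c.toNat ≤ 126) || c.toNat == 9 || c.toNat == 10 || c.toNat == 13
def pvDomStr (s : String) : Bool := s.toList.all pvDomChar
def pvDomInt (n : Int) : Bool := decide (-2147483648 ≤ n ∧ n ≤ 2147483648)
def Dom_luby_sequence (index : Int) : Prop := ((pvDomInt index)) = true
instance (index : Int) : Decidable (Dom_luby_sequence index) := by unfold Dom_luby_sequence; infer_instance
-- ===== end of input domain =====

-- B recomputes the Luby value by the classic recursive recurrence (power-of-two test
-- + bit-length jump) instead of A's two while-loops; equal on all indices ≥ -2.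

-- ===== PORT A =====
-- first while-loop of A: while p < i: k += 1; p = 2*p+1   (fuel only makes the loop total)
def lubyLoop1 (fuel : Nat) (i k p : Int) : Int × Int :=
  match fuel with
  | 0 => (k, p)
  | f+1 => if p < i then lubyLoop1 f i (k+1) (2*p+1) else (k, p)

-- second while-loop of A: while p != i: p = (p-1)>>1; if i > p: i -= p; then return (p+1)>>1
def lubyLoop2 (fuel : Nat) (i p : Int) : Int :=
  match fuel with
  | 0 => (p+1) >>> (1:Nat)
  | f+1 =>
    if p ≠ i then
      lubyLoop2 f (if i > (p-1) >>> (1:Nat) then i - (p-1) >>> (1:Nat) else i) ((p-1) >>> (1:Nat))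
    else (p+1) >>> (1:Nat)

def luby_sequence (index : Int) : Int :=
  lubyLoop2 (2*index.natAbs+8) (index+1) (lubyLoop1 (2*index.natAbs+8) (index+1) 1 1).2

-- ===== PORT B =====
-- B's recursive helper go(i): base when (i+1)&i == 0, else drop the completed prefix
def lubyGo (fuel : Nat) (i : Int) : Int :=
  match fuel with
  | 0 => 0
  | f+1 =>
    if PySem.Int.band (i+1) i = 0 then (i+1) >>> (1:Nat)
    else lubyGo f (i - ((1:Int) <<< (PySem.Int.bitLength i - 1)) + 1)

def luby_sequence_alt (index : Int) : Int := lubyGo (index.natAbs + 2) (index + 1)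

-- ===== PRECONDITION & SPEC =====
-- Pre_ excludes only index ≤ -3, where A's second while-loop never terminates (A returns no value there).
def Pre_luby_sequence (index : Int) : Prop := -2 ≤ index
instance (index : Int) : Decidable (Pre_luby_sequence index) := by unfold Pre_luby_sequence; infer_instance
def pvWitness_luby_sequence : Int := (6)

def Spec_luby_sequence (index : Int) (out : Int) : Prop := out = luby_sequence_alt index
instance (index : Int) (out : Int) : Decidable (Spec_luby_sequence index out) := by unfold Spec_luby_sequence; infer_instance

-- ===== CLAIM (what is proved, stated in full; the proofs are below) =====
def Claim_equal_luby_sequence : Prop := ∀ (index : Int), Dom_luby_sequence index → Pre_luby_sequence index → Spec_luby_sequence index (luby_sequence index)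

-- ===== LEMMAS AND PROOFS =====

-- (p-1)>>1 on Int is floor division by 2
theorem shr1_eq_div (n : Int) : n >>> (1:Nat) = n / 2 := by
  rw [Int.shiftRight_eq_div_pow]; norm_num

theorem band_pow_succ (k : Nat) : PySem.Int.band ((2:Int)^(k+1)) ((2:Int)^(k+1) - 1) = 0 := by
  have h2 : ((2:Int)^(k+1)) = ((2^(k+1) : Nat) : Int) := by push_cast; ring
  have h3 : ((2:Int)^(k+1) - 1) = ((2^(k+1) - 1 : Nat) : Int) := by
    have : 1 ≤ 2^(k+1) := Nat.one_le_two_pow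
    push_cast [this]; ring
  rw [h3, h2, PySem.Int.band_natCast, Nat.and_two_pow_sub_one_eq_mod]
  simp

theorem testBit_of_between (k n : Nat) (h1 : 2^k ≤ n) (h2 : n < 2^(k+1)) : n.testBit k = true := by
  have hd : n / 2^k % 2 = 1 := by
    have h0 : 0 < 2^k := Nat.two_pow_pos k
    have hlt : n / 2^k < 2 := by
      apply Nat.div_lt_of_lt_mul; rw [Nat.pow_succ] at h2; omega
    have h4 : 1 ≤ n / 2^k := (Nat.one_le_div_iff h0).2 h1
    omega
  have := Nat.toNat_testBit n k
  rw [hd] at this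
  cases hres : n.testBit k
  · rw [hres] at this; simp at this
  · rfl

theorem band_mid_ne (k : Nat) (i : Int) (h1 : 2^(k+1) ≤ i) (h2 : i ≤ 2^(k+2) - 2) :
    PySem.Int.band (i+1) i ≠ 0 := by
  have hp : ((2^(k+1):Nat) : Int) ≤ i := by push_cast; omega
  have hq : (i:Int) + 1 < ((2^(k+2):Nat) : Int) := by push_cast; omega
  have hp' : (0:Int) < 2^(k+1) := by positivity
  have hi0 : 0 ≤ i := by omega
  rw [PySem.Int.band_of_nonneg (by omega) hi0]
  have hc1 : 2^(k+1) ≤ i.toNat := by omega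
  have hc2 : i.toNat + 1 < 2^(k+2) := by omega
  have h5 : (i+1).toNat = i.toNat + 1 := by omega
  have hb1 : (i.toNat+1).testBit (k+1) = true :=
    testBit_of_between (k+1) (i.toNat+1) (Nat.le_succ_of_le hc1) hc2
  have hb2 : (i.toNat).testBit (k+1) = true :=
    testBit_of_between (k+1) i.toNat hc1 (Nat.lt_of_succ_lt hc2)
  have ht : ((i+1).toNat &&& i.toNat).testBit (k+1) = true := by
    rw [h5, Nat.testBit_land, hb1, hb2]; rfl
  intro hcon
  have hz : ((i+1).toNat &&& i.toNat : Nat) = 0 := by exact_mod_cast hcon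
  rw [hz] at ht; simp [Nat.zero_testBit] at ht

theorem bitLength_mid (k : Nat) (i : Int) (h1 : 2^(k+1) ≤ i) (h2 : i ≤ 2^(k+2) - 2) :
    PySem.Int.bitLength i = k + 2 := by
  have hp : ((2^(k+1):Nat) : Int) ≤ i := by push_cast; omega
  have hq : (i:Int) + 1 < ((2^(k+2):Nat) : Int) := by push_cast; omega
  have hp' : (0:Int) < 2^(k+1) := by positivity
  have hne : i ≠ 0 := by omega
  have hlo := PySem.Int.two_pow_bitLength_le i hne
  have hhi := PySem.Int.lt_two_pow_bitLength i
  have hna : i.natAbs = i.toNat := by omega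
  rw [hna] at hlo hhi
  have hc1 : 2^(k+1) ≤ i.toNat := by omega
  have hc2 : i.toNat < 2^(k+2) := by omega
  set bl := PySem.Int.bitLength i with hbl
  have hA : k + 1 < bl := by
    by_contra h
    have : 2^bl ≤ 2^(k+1) := Nat.pow_le_pow_right (by norm_num) (by omega)
    omega
  have hB : bl - 1 < k + 2 := by
    by_contra h
    have : 2^(k+2) ≤ 2^(bl-1) := Nat.pow_le_pow_right (by norm_num) (by omega)
    omega
  omega

theorem go_base (f k : Nat) : lubyGo (f+1) ((2:Int)^(k+1) - 1) = 2^k := by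
  have h1 : ((2:Int)^(k+1) - 1) + 1 = 2^(k+1) := by ring
  have h2 : (2:Int)^(k+1) = 2*2^k := by ring
  show (if PySem.Int.band (((2:Int)^(k+1) - 1)+1) ((2:Int)^(k+1) - 1) = 0 then (((2:Int)^(k+1) - 1)+1) >>> (1:Nat)
        else lubyGo f (((2:Int)^(k+1) - 1) - ((1:Int) <<< (PySem.Int.bitLength ((2:Int)^(k+1) - 1) - 1)) + 1)) = ((2:Int)^k)
  rw [h1, band_pow_succ k]
  simp [shr1_eq_div]
  omega

theorem go_step (f k : Nat) (i : Int) (h1 : 2^(k+1) ≤ i) (h2 : i ≤ 2^(k+2) - 2) :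
    lubyGo (f+1) i = lubyGo f (i - (2^(k+1) - 1)) := by
  show (if PySem.Int.band (i+1) i = 0 then (i+1) >>> (1:Nat)
        else lubyGo f (i - ((1:Int) <<< (PySem.Int.bitLength i - 1)) + 1)) = lubyGo f (i - ((2:Int)^(k+1) - 1))
  rw [if_neg (band_mid_ne k i h1 h2), bitLength_mid k i h1 h2]
  have h3 : k + 2 - 1 = k + 1 := by omega
  rw [h3]
  have h4 : (1:Int) <<< (k+1) = 2^(k+1) := by simp [Int.shiftLeft_eq]
  rw [h4]
  ring_nf

theorem loop2_eq_go : ∀ (k : Nat) (i : Int) (fa fb : Nat), 1 ≤ i → i ≤ 2^(k+1) - 1 →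
    k + 1 ≤ fa → k + 1 ≤ fb → lubyLoop2 fa i ((2:Int)^(k+1) - 1) = lubyGo fb i := by
  intro k
  induction k with
  | zero =>
    intro i fa fb hi1 hi2 hfa hfb
    obtain ⟨a, rfl⟩ : ∃ a, fa = a+1 := ⟨fa-1, by omega⟩
    obtain ⟨b, rfl⟩ : ∃ b, fb = b+1 := ⟨fb-1, by omega⟩
    have hi : i = 1 := by norm_num at hi2; omega
    subst hi
    have hband : PySem.Int.band (2 : Int) 1 = 0 := by decide
    norm_num [lubyLoop2, lubyGo, hband]
  | succ k IH =>
    intro i fa fb hi1 hi2 hfa hfb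
    obtain ⟨a, rfl⟩ : ∃ a, fa = a+1 := ⟨fa-1, by omega⟩
    obtain ⟨b, rfl⟩ : ∃ b, fb = b+1 := ⟨fb-1, by omega⟩
    have e2 : (2:Int)^(k+1+1) = 2*2^(k+1) := by ring
    have e1 : (0:Int) < 2^(k+1) := by positivity
    by_cases hpi : ((2:Int)^(k+1+1) - 1) = i
    · have hL : lubyLoop2 (a+1) i ((2:Int)^(k+1+1) - 1) = ((2:Int)^(k+1+1) - 1 + 1) >>> (1:Nat) := by
        show (if ((2:Int)^(k+1+1) - 1) ≠ i then _ else _) = _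
        rw [if_neg (by simpa using hpi)]
      rw [hL, ← hpi, go_base b (k+1), shr1_eq_div]
      omega
    · have hp' : ((2:Int)^(k+1+1) - 1 - 1) >>> (1:Nat) = 2^(k+1) - 1 := by
        rw [shr1_eq_div]; omega
      have hL : lubyLoop2 (a+1) i ((2:Int)^(k+1+1) - 1) =
          lubyLoop2 a (if i > (2:Int)^(k+1) - 1 then i - ((2:Int)^(k+1) - 1) else i) ((2:Int)^(k+1) - 1) := by
        show (if ((2:Int)^(k+1+1) - 1) ≠ i then _ else _) = _
        rw [if_pos hpi, hp']
      rw [hL]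
      by_cases hle : i ≤ (2:Int)^(k+1) - 1
      · rw [if_neg (by omega)]
        exact IH i a (b+1) hi1 hle (by omega) (by omega)
      · rw [if_pos (by omega)]
        have hpow : (2:Int)^(k+2) = 2*2^(k+1) := by ring
        have hstep := go_step b k i (by omega) (by omega)
        rw [hstep]
        exact IH (i - ((2:Int)^(k+1) - 1)) a b (by omega) (by omega) (by omega) (by omega)

theorem loop1_spec : ∀ (fuel : Nat) (i k p : Int) (m : Nat), 1 ≤ i → p = 2^(m+1) - 1 →
    i ≤ 2^(m+1+fuel) - 1 →
    ∃ K : Nat, (lubyLoop1 fuel i k p).2 = 2^(K+1) - 1 ∧ i ≤ 2^(K+1) - 1 ∧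
      ((2:Int)^(K+1) - 1 ≤ p ∨ (2:Int)^(K+1) - 1 ≤ 2*i - 1) := by
  intro fuel
  induction fuel with
  | zero =>
    intro i k p m hi hp hbound
    exact ⟨m, by simp [lubyLoop1, hp], by simpa using hbound, Or.inl (by omega)⟩
  | succ f IH =>
    intro i k p m hi hp hbound
    have hunf : lubyLoop1 (f+1) i k p = if p < i then lubyLoop1 f i (k+1) (2*p+1) else (k, p) := rfl
    rw [hunf]
    by_cases hlt : p < i
    · rw [if_pos hlt]
      have hp' : (2*p+1 : Int) = 2^(m+1+1) - 1 := by rw [hp]; ring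
      have hbound' : i ≤ 2^(m+1+1+f) - 1 := by
        have he : (2:Int)^(m+1+(f+1)) = 2^(m+1+1+f) := by ring
        omega
      obtain ⟨K, h1, h2, h3⟩ := IH i (k+1) (2*p+1) (m+1) hi hp' hbound'
      refine ⟨K, h1, h2, Or.inr ?_⟩
      rcases h3 with h|h
      · omega
      · omega
    · rw [if_neg hlt]
      exact ⟨m, by simp [hp], by omega, Or.inl (by omega)⟩

theorem main_nonneg (index : Int) (h0 : 0 ≤ index) : luby_sequence index = luby_sequence_alt index := by
  have hna : index.natAbs = index.toNat := by omega
  have hb : (index+1 : Int) ≤ 2^(0+1+(2*index.natAbs+8)) - 1 := by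
    have h1 : index.toNat < 2^index.toNat := Nat.lt_two_pow_self
    have h2 : (2:Nat)^index.toNat ≤ 2^(2*index.natAbs+8) := Nat.pow_le_pow_right (by norm_num) (by omega)
    have h3 : (2:Nat)^(0+1+(2*index.natAbs+8)) = 2^1 * 2^(2*index.natAbs+8) := by
      rw [← pow_add]
    have h4 : ((2^(0+1+(2*index.natAbs+8)) : Nat) : Int) = 2^(0+1+(2*index.natAbs+8)) := by
      push_cast; ring
    omega
  obtain ⟨K, hres, hiK, hdisj⟩ :=
    loop1_spec (2*index.natAbs+8) (index+1) 1 1 0 (by omega) (by norm_num) hb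
  have eK : (2:Int)^(K+1) = 2*2^K := by ring
  have hK2 : (2:Int)^K ≤ index + 1 := by
    have h0' : (0:Int) < 2^K := by positivity
    rcases hdisj with h|h
    · omega
    · omega
  have hKn : K ≤ index.toNat := by
    have h5 : K < 2^K := Nat.lt_two_pow_self
    have h6 : ((2^K : Nat) : Int) = 2^K := by push_cast; ring
    omega
  unfold luby_sequence luby_sequence_alt
  rw [hres]
  exact loop2_eq_go K (index+1) (2*index.natAbs+8) (index.natAbs+2)
    (by omega) hiK (by omega) (by omega)

-- ===== VERDICT (by name: the statement is the Claim_ definition above) =====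
theorem luby_sequence_spec : Claim_equal_luby_sequence := by
  intro index _ hpre
  unfold Spec_luby_sequence
  by_cases h0 : 0 ≤ index
  · exact main_nonneg index h0
  · unfold Pre_luby_sequence at hpre
    have : index = -1 ∨ index = -2 := by omega
    rcases this with h|h <;> subst h <;> decide
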